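-- pv_equiv track=rewrite | github.com/meganweller21/BinPacking | bin_packing.py | find_naive_solution
-- ===== SOURCE A (Python) =====
-- def find_naive_solution (rectangles):
-- 	placement = []
-- 	upper_left_x = 0
-- 	upper_left_y = 0
--
-- 	for rectangle in rectangles:
-- 		width = rectangle[0]
-- 		coordinate = (upper_left_x, upper_left_y)   # make a tuple
-- 		placement.insert(0, coordinate)             # insert tuple at front of list
-- 		upper_left_x = upper_left_x + width
--
-- 	placement.reverse()                             # original order
-- 	return placement
-- ===== SOURCE B (Python) =====
-- def find_naive_solution(rectangles):
--     return [(sum(r[0] for r in rectangles[:i]), 0) for i in range(len(rectangles))]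
-- ===== Notes on version B (the rewrite author's own statement) =====
-- stated objective: alternative
-- what changed: B carries no running state at all: for each index i it recomputes the x offset from scratch as the sum of the widths of the slice rectangles[:i], instead of A's single pass maintaining a running x with front-insertion and a final reverse; trades O(n) for O(n^2) in exchange for a one-line stateless comprehension.
import Mathlib
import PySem

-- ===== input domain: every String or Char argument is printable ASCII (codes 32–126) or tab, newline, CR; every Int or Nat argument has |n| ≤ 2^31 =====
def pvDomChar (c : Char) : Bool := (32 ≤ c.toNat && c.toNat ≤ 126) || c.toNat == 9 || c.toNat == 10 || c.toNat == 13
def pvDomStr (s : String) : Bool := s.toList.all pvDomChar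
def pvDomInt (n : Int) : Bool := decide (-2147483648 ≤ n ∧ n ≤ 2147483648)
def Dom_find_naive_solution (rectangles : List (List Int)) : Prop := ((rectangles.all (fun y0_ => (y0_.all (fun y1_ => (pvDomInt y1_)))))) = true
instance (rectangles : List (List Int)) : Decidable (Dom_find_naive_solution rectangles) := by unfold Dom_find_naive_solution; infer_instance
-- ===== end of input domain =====

-- B is stateless: each x offset is recomputed from scratch as the sum of widths of rectangles[:i];
-- A keeps a running x, front-inserts and reverses.

-- ===== PORT A =====
-- running state: (placement, upper_left_x); upper_left_y is constantly 0
def find_naive_solution (rectangles : List (List Int)) : List (Int × Int) :=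
  let st := rectangles.foldl
    (fun (st : List (Int × Int) × Int) rectangle =>
      let width := (PySem.List.pyGet? rectangle 0).getD 0   -- rectangle[0]; none (IndexError) excluded by Pre_
      let coordinate := (st.2, (0 : Int))
      (coordinate :: st.1, st.2 + width))
    ([], 0)
  st.1.reverse

-- ===== PORT B =====
def find_naive_solution_alt (rectangles : List (List Int)) : List (Int × Int) :=
  (PySem.List.pyRange 0 rectangles.length 1).map
    (fun i => (((PySem.List.slice rectangles none (some i)).map
                  (fun r => (PySem.List.pyGet? r 0).getD 0)).sum, (0 : Int)))

-- ===== PRECONDITION & SPEC =====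
-- Pre_ excludes exactly the inputs where Python A raises IndexError: an empty inner rectangle list.
def Pre_find_naive_solution (rectangles : List (List Int)) : Prop :=
  ∀ r ∈ rectangles, r ≠ []
instance (rectangles : List (List Int)) : Decidable (Pre_find_naive_solution rectangles) := by unfold Pre_find_naive_solution; infer_instance
def pvWitness_find_naive_solution : List (List Int) := [[3, 4], [2, 2], [5, 1]]
def Spec_find_naive_solution (rectangles : List (List Int)) (out : List (Int × Int)) : Prop := out = find_naive_solution_alt rectangles
instance (rectangles : List (List Int)) (out : List (Int × Int)) : Decidable (Spec_find_naive_solution rectangles out) := by unfold Spec_find_naive_solution; infer_instance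

-- ===== CLAIM (what is proved, stated in full; the proofs are below) =====
def Claim_equal_find_naive_solution : Prop := ∀ (rectangles : List (List Int)), Dom_find_naive_solution rectangles → Pre_find_naive_solution rectangles → Spec_find_naive_solution rectangles (find_naive_solution rectangles)

-- ===== LEMMAS AND PROOFS =====

-- width of a rectangle, proof shorthand
def pvW (r : List Int) : Int := (PySem.List.pyGet? r 0).getD 0

-- the sequence of x coordinates A produces, starting from running x
def pvF (l : List (List Int)) (x : Int) : List Int :=
  match l with
  | [] => []
  | r :: rs => x :: pvF rs (x + pvW r)

theorem pvA_fold (l : List (List Int)) (p : List (Int × Int)) (x : Int) :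
    ((l.foldl (fun (st : List (Int × Int) × Int) rectangle =>
        ((st.2, (0 : Int)) :: st.1, st.2 + (PySem.List.pyGet? rectangle 0).getD 0))
      (p, x)).1).reverse = p.reverse ++ (pvF l x).map (fun z => (z, (0 : Int))) := by
  induction l generalizing p x with
  | nil => simp [pvF]
  | cons r rs ih => simp [pvF, ih, pvW]

theorem pvF_eq_sums (l : List (List Int)) (x : Int) :
    pvF l x = (List.range l.length).map (fun k => x + ((l.take k).map pvW).sum) := by
  induction l generalizing x with
  | nil => simp [pvF]
  | cons r rs ih =>
    simp only [pvF, List.length_cons, List.range_succ_eq_map, List.map_cons, List.take_zero,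
      List.map_nil, List.sum_nil, add_zero, List.map_map, ih]
    refine congrArg (x :: ·) (List.map_congr_left fun k _ => ?_)
    simp [Function.comp, add_assoc]

-- ===== VERDICT (by name: the statement is the Claim_ definition above) =====
theorem find_naive_solution_spec : Claim_equal_find_naive_solution := by
  intro rectangles _ _
  unfold Spec_find_naive_solution find_naive_solution find_naive_solution_alt
  simp only [pvA_fold, List.reverse_nil, List.nil_append]
  rw [pvF_eq_sums, PySem.List.pyRange_one]
  simp only [Int.sub_zero, Int.toNat_natCast, List.map_map]
  apply List.map_congr_left
  intro k hk
  simp only [Function.comp, zero_add, PySem.List.slice_to_natCast, List.map_take]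
  rfl
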